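-- pv_equiv track=rewrite | github.com/DeanLuus22021994/Aspire-Full | tools/python-lint/run.py | _partition_args
-- ===== SOURCE A (Python) =====
-- from typing import Iterable, Tuple
--
-- def _partition_args(args: Iterable[str]) -> Tuple[list[str], list[str], bool]:
--     options: list[str] = []
--     targets: list[str] = []
--     after_double_dash = False
--     for arg in args:
--         if after_double_dash:
--             targets.append(arg)
--             continue
--         if arg == "--":
--             after_double_dash = True
--             continue
--         if arg.startswith("-") and arg != "-":
--             options.append(arg)
--         else:
--             targets.append(arg)
--     return options, targets, after_double_dash
-- ===== SOURCE B (Python) =====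
-- def _partition_args(args):
--     args = list(args)
--     after_double_dash = "--" in args
--     if after_double_dash:
--         idx = args.index("--")
--         before, after = args[:idx], args[idx + 1:]
--     else:
--         before, after = args, []
--     is_opt = lambda a: a.startswith("-") and a != "-"
--     options = [a for a in before if is_opt(a)]
--     targets = [a for a in before if not is_opt(a)] + after
--     return options, targets, after_double_dash
-- ===== Notes on version B (the rewrite author's own statement) =====
-- stated objective: simpler
-- what changed: Replaces the stateful one-pass loop with a flag by a declarative split at the first '--' (index + slices) followed by two filter comprehensions over the prefix.
import Mathlib
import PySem

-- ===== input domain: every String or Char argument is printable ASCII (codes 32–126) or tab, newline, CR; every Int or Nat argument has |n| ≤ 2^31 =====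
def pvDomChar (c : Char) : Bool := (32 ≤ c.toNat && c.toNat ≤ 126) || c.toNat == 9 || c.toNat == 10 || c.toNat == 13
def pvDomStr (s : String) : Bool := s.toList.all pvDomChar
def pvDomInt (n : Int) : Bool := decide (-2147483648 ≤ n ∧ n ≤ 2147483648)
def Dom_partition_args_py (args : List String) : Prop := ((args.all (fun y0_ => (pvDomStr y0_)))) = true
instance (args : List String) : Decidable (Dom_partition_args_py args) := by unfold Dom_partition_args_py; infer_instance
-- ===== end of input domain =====

-- B replaces A's stateful flag-driven loop by a declarative split at the first "--" plus two
-- filter comprehensions over the prefix (objective: simpler).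

-- ===== PORT A =====
-- one-pass loop with mutable state (options, targets, after_double_dash)
def pvStepA (st : List String × List String × Bool) (arg : String) :
    List String × List String × Bool :=
  match st with
  | (options, targets, add) =>
    if add then (options, targets ++ [arg], add)
    else if arg == "--" then (options, targets, true)
    else if PySem.Str.startswith arg "-" && arg != "-" then (options ++ [arg], targets, add)
    else (options, targets ++ [arg], add)

def partition_args_py (args : List String) : List String × List String × Bool :=
  args.foldl pvStepA ([], [], false)

-- ===== PORT B =====
def pvIsOpt (a : String) : Bool := PySem.Str.startswith a "-" && a != "-"

def partition_args_py_alt (args : List String) : List String × List String × Bool :=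
  let after_double_dash := args.contains "--"
  let ba : List String × List String :=
    if after_double_dash then
      match PySem.List.index? args "--" with
      | some idx => (PySem.List.slice args none (some (idx : Int)),
                     PySem.List.slice args (some ((idx : Int) + 1)) none)
      | none => (args, [])
    else (args, [])
  (ba.1.filter pvIsOpt, ba.1.filter (fun a => !(pvIsOpt a)) ++ ba.2, after_double_dash)

-- ===== PRECONDITION & SPEC =====
def Spec_partition_args_py (args : List String) (out : List String × List String × Bool) : Prop := out = partition_args_py_alt args
instance (args : List String) (out : List String × List String × Bool) : Decidable (Spec_partition_args_py args out) := by unfold Spec_partition_args_py; infer_instance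

-- ===== CLAIM (what is proved, stated in full; the proofs are below) =====
def Claim_equal_partition_args_py : Prop := ∀ (args : List String), Dom_partition_args_py args → Spec_partition_args_py args (partition_args_py args)

-- ===== LEMMAS AND PROOFS =====

-- after the flag is set, A just appends everything to targets
theorem pv_foldl_true (xs : List String) (o t : List String) :
    xs.foldl pvStepA (o, t, true) = (o, t ++ xs, true) := by
  induction xs generalizing t with
  | nil => simp
  | cons a rest ih => simp [pvStepA, ih]

theorem pv_alt_nil : partition_args_py_alt [] = ([], [], false) := by
  simp [partition_args_py_alt]

theorem pv_alt_dashdash (rest : List String) :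
    partition_args_py_alt ("--" :: rest) = ([], rest, true) := by
  simp only [partition_args_py_alt, PySem.List.index?_cons_self, List.contains_cons,
    beq_self_eq_true, Bool.true_or, if_true]
  have h1 : PySem.List.slice ("--" :: rest) none (some ((0 : Nat) : Int)) = [] := by
    rw [PySem.List.slice_to_natCast]; rfl
  have h2 : PySem.List.slice ("--" :: rest) (some (((0 : Nat) : Int) + 1)) none = rest := by
    norm_num [PySem.List.slice_from_one]
  push_cast at h1 h2
  simp [h1, h2]

theorem pv_alt_cons (a : String) (rest : List String) (ha : a ≠ "--") :
    partition_args_py_alt (a :: rest) =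
      (let r := partition_args_py_alt rest
       if pvIsOpt a then (a :: r.1, r.2.1, r.2.2) else (r.1, a :: r.2.1, r.2.2)) := by
  by_cases hm : "--" ∈ rest
  · obtain ⟨i, hi⟩ := Option.isSome_iff_exists.mp ((PySem.List.index?_isSome_iff rest "--").mpr hm)
    have hcons : PySem.List.index? (a :: rest) "--" = some (i + 1) := by
      rw [PySem.List.index?_cons_of_ne rest ha, hi]; rfl
    have h1 : PySem.List.slice (a :: rest) none (some ((i + 1 : Nat) : Int)) =
        a :: PySem.List.slice rest none (some (i : Int)) := by
      rw [PySem.List.slice_to_natCast, PySem.List.slice_to_natCast]; rfl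
    have h2 : PySem.List.slice (a :: rest) (some (((i + 1 : Nat) : Int) + 1)) none =
        PySem.List.slice rest (some ((i : Int) + 1)) none := by
      have e1 : ((i + 1 : Nat) : Int) + 1 = ((i + 2 : Nat) : Int) := by push_cast; ring
      have e2 : ((i : Int) + 1) = ((i + 1 : Nat) : Int) := by push_cast; ring
      rw [e1, e2, PySem.List.slice_from_natCast, PySem.List.slice_from_natCast]
      rfl
    simp only [partition_args_py_alt, hcons, hi, List.contains_cons]
    have hane : (a == "--") = false := by simp [ha]
    simp only [hm, decide_true, if_true, List.contains_eq_mem]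
    push_cast at h1 h2 ⊢
    rw [h1, h2]
    by_cases hopt : pvIsOpt a <;> simp [hopt]
  · have hc : ((a :: rest).contains "--") = false := by
      have h' : ¬ ("--" = a) := fun h => ha h.symm
      simp [hm, h']
    simp only [partition_args_py_alt, hc, List.contains_eq_mem, hm]
    simp only [Bool.false_eq_true, if_false, decide_eq_true_eq]
    by_cases hopt : pvIsOpt a <;> simp [hopt]

-- loop invariant: A's fold from accumulators (o, t, false) is B's result prefixed by them
theorem pv_fold_eq (args : List String) : ∀ (o t : List String),
    args.foldl pvStepA (o, t, false) =
      (o ++ (partition_args_py_alt args).1,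
       t ++ (partition_args_py_alt args).2.1,
       (partition_args_py_alt args).2.2) := by
  induction args with
  | nil => intro o t; simp [pv_alt_nil]
  | cons a rest ih =>
    intro o t
    by_cases ha : a = "--"
    · subst ha
      simp only [List.foldl_cons, pvStepA, pv_alt_dashdash]
      simp [pv_foldl_true]
    · have hs : pvStepA (o, t, false) a =
          (if pvIsOpt a then (o ++ [a], t, false) else (o, t ++ [a], false)) := by
        have : (a == "--") = false := by simp [ha]
        simp [pvStepA, this, pvIsOpt]
      rw [List.foldl_cons, hs, pv_alt_cons a rest ha]
      by_cases hopt : pvIsOpt a <;> simp [hopt, ih]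

-- ===== VERDICT (by name: the statement is the Claim_ definition above) =====
theorem partition_args_py_spec : Claim_equal_partition_args_py := by
  intro args _
  unfold Spec_partition_args_py partition_args_py
  simpa using pv_fold_eq args [] []
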